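-- pv_equiv track=rewrite | github.com/ihlamury/vcbench | features/extract_structured.py | _get_degree_level
-- ===== SOURCE A (Python) =====
-- def _get_degree_level(degree_str):
--     """Map degree string to ordinal: PhD=4, MBA/JD/MD=3, MS=2, BS/BA=1, other=0."""
--     if not degree_str:
--         return 0
--     d = degree_str.lower().strip()
--
--     if any(kw in d for kw in ["phd", "ph.d", "dphil", "scd", "edd", "psyd", "dba"]):
--         return 4
--     if any(kw in d for kw in ["postdoc", "postdoctoral"]):
--         return 4
--     if any(kw in d for kw in ["mba", "jd", "md", "do ", "dds", "dmd", "dvm", "pharmd"]):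
--         return 3
--     if d in ("md", "do", "jd", "mba", "dds", "dmd", "dvm"):
--         return 3
--     if any(kw in d for kw in [
--         "ms", "ma", "msc", "meng", "med", "mfa", "mph", "mpp", "mpa",
--         "mfin", "mim", "llm", "mphil", "master", "mdes", "march",
--         "mba", "executive mba",
--     ]):
--         return 2
--     if any(kw in d for kw in [
--         "bs", "ba", "bsc", "beng", "btech", "bba", "bfa", "barch",
--         "bachelor", "bcom", "be ", "undergraduate",
--     ]):
--         return 1
--     if d in ("be", "ba", "bs", "bsc", "bfa", "bba", "bcom"):
--         return 1
--
--     return 0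
-- ===== SOURCE B (Python) =====
-- # Table-driven: one max-accumulating scan over (keyword, level) pairs instead of a descending if-cascade.
-- _SUBSTR = [
--     ("phd", 4), ("ph.d", 4), ("dphil", 4), ("scd", 4), ("edd", 4), ("psyd", 4), ("dba", 4),
--     ("postdoc", 4), ("postdoctoral", 4),
--     ("mba", 3), ("jd", 3), ("md", 3), ("do ", 3), ("dds", 3), ("dmd", 3), ("dvm", 3), ("pharmd", 3),
--     ("ms", 2), ("ma", 2), ("msc", 2), ("meng", 2), ("med", 2), ("mfa", 2), ("mph", 2), ("mpp", 2),
--     ("mpa", 2), ("mfin", 2), ("mim", 2), ("llm", 2), ("mphil", 2), ("master", 2), ("mdes", 2),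
--     ("march", 2), ("mba", 2), ("executive mba", 2),
--     ("bs", 1), ("ba", 1), ("bsc", 1), ("beng", 1), ("btech", 1), ("bba", 1), ("bfa", 1),
--     ("barch", 1), ("bachelor", 1), ("bcom", 1), ("be ", 1), ("undergraduate", 1),
-- ]
-- _EXACT = [("do", 3), ("be", 1)]
--
-- def _get_degree_level(degree_str):
--     if not degree_str:
--         return 0
--     d = degree_str.lower().strip()
--     best = 0
--     for kw, lv in _SUBSTR:
--         if kw in d:
--             best = max(best, lv)
--     for kw, lv in _EXACT:
--         if d == kw:
--             best = max(best, lv)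
--     return best
-- ===== Notes on version B (the rewrite author's own statement) =====
-- stated objective: simpler
-- what changed: Replaces the hard-coded descending if-cascade of any()/tuple-membership checks with one (keyword, level) table scanned once while accumulating the maximum level, plus two exact-match entries ('do'->3, 'be'->1).
import Mathlib
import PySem

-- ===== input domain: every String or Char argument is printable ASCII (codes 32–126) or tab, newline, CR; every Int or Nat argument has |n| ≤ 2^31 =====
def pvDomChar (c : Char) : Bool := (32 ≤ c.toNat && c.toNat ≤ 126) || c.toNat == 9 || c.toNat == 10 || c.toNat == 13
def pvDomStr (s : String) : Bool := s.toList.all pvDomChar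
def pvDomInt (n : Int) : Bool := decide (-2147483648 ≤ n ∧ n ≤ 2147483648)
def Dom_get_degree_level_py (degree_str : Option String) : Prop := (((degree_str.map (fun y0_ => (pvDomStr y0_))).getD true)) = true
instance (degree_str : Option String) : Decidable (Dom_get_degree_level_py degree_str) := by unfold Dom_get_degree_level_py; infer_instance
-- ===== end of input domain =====

-- B replaces A's descending if-cascade with a (keyword, level) table scanned once, accumulating the max level (objective: simpler).

-- ===== PORT A =====
def get_degree_level_py (degree_str : Option String) : Int :=
  match degree_str with
  | none => 0
  | some s =>
    if s == "" then 0
    else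
      let d := PySem.Str.strip (PySem.Str.lower s)
      if ["phd", "ph.d", "dphil", "scd", "edd", "psyd", "dba"].any (fun kw => PySem.Str.isIn kw d) then 4
      else if ["postdoc", "postdoctoral"].any (fun kw => PySem.Str.isIn kw d) then 4
      else if ["mba", "jd", "md", "do ", "dds", "dmd", "dvm", "pharmd"].any (fun kw => PySem.Str.isIn kw d) then 3
      else if (d == "md" || d == "do" || d == "jd" || d == "mba" || d == "dds" || d == "dmd" || d == "dvm") then 3
      else if ["ms", "ma", "msc", "meng", "med", "mfa", "mph", "mpp", "mpa",
               "mfin", "mim", "llm", "mphil", "master", "mdes", "march",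
               "mba", "executive mba"].any (fun kw => PySem.Str.isIn kw d) then 2
      else if ["bs", "ba", "bsc", "beng", "btech", "bba", "bfa", "barch",
               "bachelor", "bcom", "be ", "undergraduate"].any (fun kw => PySem.Str.isIn kw d) then 1
      else if (d == "be" || d == "ba" || d == "bs" || d == "bsc" || d == "bfa" || d == "bba" || d == "bcom") then 1
      else 0

-- ===== PORT B =====
-- substring keywords with their levels ('mba' kept at both 3 and 2, as in A's lists; max keeps 3)
def pvSubTable : List (String × Int) :=
  [("phd", 4), ("ph.d", 4), ("dphil", 4), ("scd", 4), ("edd", 4), ("psyd", 4), ("dba", 4),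
   ("postdoc", 4), ("postdoctoral", 4),
   ("mba", 3), ("jd", 3), ("md", 3), ("do ", 3), ("dds", 3), ("dmd", 3), ("dvm", 3), ("pharmd", 3),
   ("ms", 2), ("ma", 2), ("msc", 2), ("meng", 2), ("med", 2), ("mfa", 2), ("mph", 2), ("mpp", 2),
   ("mpa", 2), ("mfin", 2), ("mim", 2), ("llm", 2), ("mphil", 2), ("master", 2), ("mdes", 2),
   ("march", 2), ("mba", 2), ("executive mba", 2),
   ("bs", 1), ("ba", 1), ("bsc", 1), ("beng", 1), ("btech", 1), ("bba", 1), ("bfa", 1),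
   ("barch", 1), ("bachelor", 1), ("bcom", 1), ("be ", 1), ("undergraduate", 1)]

def pvExactTable : List (String × Int) := [("do", 3), ("be", 1)]

def get_degree_level_py_alt (degree_str : Option String) : Int :=
  match degree_str with
  | none => 0
  | some s =>
    if s == "" then 0
    else
      let d := PySem.Str.strip (PySem.Str.lower s)
      let best := pvSubTable.foldl (fun b p => if PySem.Str.isIn p.1 d then max b p.2 else b) 0
      pvExactTable.foldl (fun b p => if d == p.1 then max b p.2 else b) best

-- ===== PRECONDITION & SPEC =====
def Spec_get_degree_level_py (degree_str : Option String) (out : Int) : Prop := out = get_degree_level_py_alt degree_str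
instance (degree_str : Option String) (out : Int) : Decidable (Spec_get_degree_level_py degree_str out) := by unfold Spec_get_degree_level_py; infer_instance

-- ===== CLAIM (what is proved, stated in full; the proofs are below) =====
def Claim_equal_get_degree_level_py : Prop := ∀ (degree_str : Option String), Dom_get_degree_level_py degree_str → Spec_get_degree_level_py degree_str (get_degree_level_py degree_str)

-- ===== LEMMAS AND PROOFS =====

-- a constant-level segment of the table folds to "if any keyword hits then max b v else b"
theorem pv_seg (d : String) (v : Int) (kws : List String) (b : Int) :
    (kws.map (fun k => (k, v))).foldl (fun acc q => if PySem.Str.isIn q.1 d then max acc q.2 else acc) b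
      = if kws.any (fun kw => PySem.Str.isIn kw d) then max b v else b := by
  induction kws generalizing b with
  | nil => simp
  | cons k t ih =>
    simp only [List.map_cons, List.foldl_cons, List.any_cons]
    by_cases hp : PySem.Str.isIn k d = true
    · simp only [hp, Bool.true_or, if_true, ih]
      split <;> simp
    · have hp' : PySem.Str.isIn k d = false := by simpa using hp
      simp only [hp', Bool.false_eq_true, Bool.false_or, if_false, ih]

-- the two bodies agree for every stripped/lowered string d
theorem pv_core (d : String) :
    (if ["phd", "ph.d", "dphil", "scd", "edd", "psyd", "dba"].any (fun kw => PySem.Str.isIn kw d) then (4 : Int)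
     else if ["postdoc", "postdoctoral"].any (fun kw => PySem.Str.isIn kw d) then 4
     else if ["mba", "jd", "md", "do ", "dds", "dmd", "dvm", "pharmd"].any (fun kw => PySem.Str.isIn kw d) then 3
     else if (d == "md" || d == "do" || d == "jd" || d == "mba" || d == "dds" || d == "dmd" || d == "dvm") then 3
     else if ["ms", "ma", "msc", "meng", "med", "mfa", "mph", "mpp", "mpa",
              "mfin", "mim", "llm", "mphil", "master", "mdes", "march",
              "mba", "executive mba"].any (fun kw => PySem.Str.isIn kw d) then 2
     else if ["bs", "ba", "bsc", "beng", "btech", "bba", "bfa", "barch",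
              "bachelor", "bcom", "be ", "undergraduate"].any (fun kw => PySem.Str.isIn kw d) then 1
     else if (d == "be" || d == "ba" || d == "bs" || d == "bsc" || d == "bfa" || d == "bba" || d == "bcom") then 1
     else 0)
    = pvExactTable.foldl (fun b p => if d == p.1 then max b p.2 else b)
        (pvSubTable.foldl (fun b p => if PySem.Str.isIn p.1 d then max b p.2 else b) 0) := by
  by_cases h01 : d = "md";  · subst h01; decide
  by_cases h02 : d = "do";  · subst h02; decide
  by_cases h03 : d = "jd";  · subst h03; decide
  by_cases h04 : d = "mba"; · subst h04; decide
  by_cases h05 : d = "dds"; · subst h05; decide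
  by_cases h06 : d = "dmd"; · subst h06; decide
  by_cases h07 : d = "dvm"; · subst h07; decide
  by_cases h08 : d = "be";  · subst h08; decide
  by_cases h09 : d = "ba";  · subst h09; decide
  by_cases h10 : d = "bs";  · subst h10; decide
  by_cases h11 : d = "bsc"; · subst h11; decide
  by_cases h12 : d = "bfa"; · subst h12; decide
  by_cases h13 : d = "bba"; · subst h13; decide
  by_cases h14 : d = "bcom"; · subst h14; decide
  have htab : pvSubTable =
      (["phd", "ph.d", "dphil", "scd", "edd", "psyd", "dba"].map (fun k => (k, (4 : Int))))
      ++ (["postdoc", "postdoctoral"].map (fun k => (k, (4 : Int))))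
      ++ (["mba", "jd", "md", "do ", "dds", "dmd", "dvm", "pharmd"].map (fun k => (k, (3 : Int))))
      ++ (["ms", "ma", "msc", "meng", "med", "mfa", "mph", "mpp", "mpa",
           "mfin", "mim", "llm", "mphil", "master", "mdes", "march",
           "mba", "executive mba"].map (fun k => (k, (2 : Int))))
      ++ (["bs", "ba", "bsc", "beng", "btech", "bba", "bfa", "barch",
           "bachelor", "bcom", "be ", "undergraduate"].map (fun k => (k, (1 : Int)))) := rfl
  rw [htab]
  simp only [List.foldl_append, pv_seg, pvExactTable, List.foldl_cons, List.foldl_nil]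
  simp only [h01, h02, h03, h04, h05, h06, h07, h08, h09, h10, h11, h12, h13, h14,
             beq_iff_eq, Bool.or_eq_true, or_self]
  simp only [if_neg, not_false_eq_true]
  split_ifs <;> omega

-- ===== VERDICT (by name: the statement is the Claim_ definition above) =====
theorem get_degree_level_py_spec : Claim_equal_get_degree_level_py := by
  intro ds _
  unfold Spec_get_degree_level_py
  cases ds with
  | none => rfl
  | some s =>
    by_cases hs : s = ""
    · subst hs; decide
    · have hs' : (s == "") = false := by simp [hs]
      simp only [get_degree_level_py, get_degree_level_py_alt, hs', Bool.false_eq_true, if_false]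
      exact pv_core _
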